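-- pv_equiv track=rewrite | github.com/SANDtcs/MM | PS8.py | find_conserved_regions
-- ===== SOURCE A (Python) =====
-- def find_conserved_regions(matrices, seq_len, window, threshold):
--   """Identifies conserved regions across multiple pairwise comparisons."""
--   conserved_regions = []
--   for i in range(seq_len - window + 1):
--     conserved_at_i = True
--     for matrix in matrices:
--       conserved_in_matrix = False
--       for j in range(seq_len - window + 1):
--         if matrix[i][j] == 1:
--           conserved_in_matrix = True
--           break
--       if not conserved_in_matrix:
--         conserved_at_i = False
--         break
--
--     if conserved_at_i:
--       conserved_regions.append(i)
--
--   return conserved_regions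
-- ===== SOURCE B (Python) =====
-- def find_conserved_regions(matrices, seq_len, window, threshold):
--     """Set-intersection reformulation: intersect per-matrix sets of good rows."""
--     R = seq_len - window + 1
--     good = set(range(R))
--     for m in matrices:
--         good &= {i for i, row in enumerate(m[:R]) if 1 in row[:R]}
--     return sorted(good)
-- ===== Notes on version B (the rewrite author's own statement) =====
-- stated objective: alternative
-- what changed: Replaces the triple nested loop with early-exit break flags by building, per matrix, the set of row indices whose first R columns contain a 1, intersecting these sets (starting from set(range(R))), and returning the sorted intersection.
-- outside the precondition, e.g. on find_conserved_regions([[[0, 0], [0, 0]], [[0], [0]]], 2, 1, 0): A returns [], B returns []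
import Mathlib
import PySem

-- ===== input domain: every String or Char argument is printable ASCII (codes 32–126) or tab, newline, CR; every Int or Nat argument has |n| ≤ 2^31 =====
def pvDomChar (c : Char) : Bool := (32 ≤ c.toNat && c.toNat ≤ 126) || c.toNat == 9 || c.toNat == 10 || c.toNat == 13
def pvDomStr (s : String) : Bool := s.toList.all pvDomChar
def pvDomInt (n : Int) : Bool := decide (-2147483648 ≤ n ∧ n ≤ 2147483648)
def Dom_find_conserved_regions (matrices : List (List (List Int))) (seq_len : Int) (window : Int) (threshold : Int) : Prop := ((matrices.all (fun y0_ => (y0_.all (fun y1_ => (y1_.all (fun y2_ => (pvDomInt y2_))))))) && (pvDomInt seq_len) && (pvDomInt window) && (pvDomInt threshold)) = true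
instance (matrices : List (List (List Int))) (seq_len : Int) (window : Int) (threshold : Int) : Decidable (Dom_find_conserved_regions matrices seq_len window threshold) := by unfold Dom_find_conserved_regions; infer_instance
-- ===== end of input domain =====

-- B replaces A's triple nested loop (with break flags) by per-matrix sets of good row
-- indices, a set intersection across matrices starting from set(range(R)), and a final sort.

-- ===== PORT A =====
-- inner 'for j in range(...)' loop with break: returns the final conserved_in_matrix flag
def aRowLoop (row : List Int) : List Int → Bool
  | [] => false
  | j :: js => if PySem.List.pyGetD row j 0 = 1 then true else aRowLoop row js

-- 'for matrix in matrices' loop with break: returns the final conserved_at_i flag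
def aMatLoop (i R : Int) : List (List (List Int)) → Bool
  | [] => true
  | m :: ms =>
    if aRowLoop (PySem.List.pyGetD m i []) (PySem.List.pyRange 0 R 1) then aMatLoop i R ms
    else false

def find_conserved_regions (matrices : List (List (List Int))) (seq_len : Int) (window : Int) (threshold : Int) : List Int :=
  (PySem.List.pyRange 0 (seq_len - window + 1) 1).foldl
    (fun acc i => if aMatLoop i (seq_len - window + 1) matrices then acc ++ [i] else acc) []

-- ===== PORT B =====
-- {i for i, row in enumerate(m[:R]) if 1 in row[:R]}
def altRowSet (R : Int) (m : List (List Int)) : PySem.Set Int :=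
  PySem.Set.ofList
    (((PySem.List.enumerate (PySem.List.slice m none (some R))).filter
        (fun p => (PySem.List.slice p.2 none (some R)).contains 1)).map (fun p => p.1))

def find_conserved_regions_alt (matrices : List (List (List Int))) (seq_len : Int) (window : Int) (threshold : Int) : List Int :=
  let R := seq_len - window + 1
  PySem.List.sorted
    (matrices.foldl (fun g m => PySem.Set.inter g (altRowSet R m))
      (PySem.Set.ofList (PySem.List.pyRange 0 R 1)))
    (fun x => x)

-- ===== PRECONDITION & SPEC =====
-- Pre_ excludes the inputs where Python A raises IndexError (matrix[i] or matrix[i][j] out of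
-- range for some scanned i, j < R).  It is slightly narrower than A's exact returning set: A's
-- early breaks can skip some out-of-range accesses (e.g. a later matrix is never scanned, or a
-- row contains a 1 before its short end); B returns the same value on those skipped shapes too,
-- but the simple closed-form shape condition below is required of every matrix uniformly.
def Pre_find_conserved_regions (matrices : List (List (List Int))) (seq_len : Int) (window : Int) (threshold : Int) : Prop :=
  ∀ m ∈ matrices, (seq_len - window + 1) ≤ (m.length : Int) ∧
    ∀ row ∈ m, (seq_len - window + 1) ≤ (row.length : Int)
instance (matrices : List (List (List Int))) (seq_len : Int) (window : Int) (threshold : Int) : Decidable (Pre_find_conserved_regions matrices seq_len window threshold) := by unfold Pre_find_conserved_regions; infer_instance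
def pvWitness_find_conserved_regions : List (List (List Int)) × Int × Int × Int :=
  ([[[1, 0], [0, 1]]], 2, 1, 0)
def Spec_find_conserved_regions (matrices : List (List (List Int))) (seq_len : Int) (window : Int) (threshold : Int) (out : List Int) : Prop := out = find_conserved_regions_alt matrices seq_len window threshold
instance (matrices : List (List (List Int))) (seq_len : Int) (window : Int) (threshold : Int) (out : List Int) : Decidable (Spec_find_conserved_regions matrices seq_len window threshold out) := by unfold Spec_find_conserved_regions; infer_instance

-- ===== CLAIM (what is proved, stated in full; the proofs are below) =====
def Claim_equal_find_conserved_regions : Prop := ∀ (matrices : List (List (List Int))) (seq_len : Int) (window : Int) (threshold : Int), Dom_find_conserved_regions matrices seq_len window threshold → Pre_find_conserved_regions matrices seq_len window threshold → Spec_find_conserved_regions matrices seq_len window threshold (find_conserved_regions matrices seq_len window threshold)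

-- ===== LEMMAS AND PROOFS =====

-- the inner break-loop is an 'any' over the iterated indices
theorem aRowLoop_eq_any (row : List Int) (js : List Int) :
    aRowLoop row js = js.any (fun j => decide (PySem.List.pyGetD row j 0 = 1)) := by
  induction js with
  | nil => rfl
  | cons j js ih => by_cases h : PySem.List.pyGetD row j 0 = 1 <;> simp [aRowLoop, h, ih]

-- the matrix break-loop is an 'all' over the matrices
theorem aMatLoop_eq_all (i R : Int) (ms : List (List (List Int))) :
    aMatLoop i R ms =
      ms.all (fun m => aRowLoop (PySem.List.pyGetD m i []) (PySem.List.pyRange 0 R 1)) := by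
  induction ms with
  | nil => rfl
  | cons m ms ih =>
    by_cases h : aRowLoop (PySem.List.pyGetD m i []) (PySem.List.pyRange 0 R 1) <;>
      simp [aMatLoop, h, ih]

-- the inner scan over a single row agrees with '1 in row[:R]'
theorem aRowLoop_range_eq (row : List Int) (R : Int) :
    aRowLoop row (PySem.List.pyRange 0 R 1) = (row.take R.toNat).contains 1 := by
  rw [aRowLoop_eq_any, Bool.eq_iff_iff]
  simp only [List.any_eq_true, PySem.List.mem_pyRange_one, List.contains_iff_mem,
    List.mem_take_iff_getElem, decide_eq_true_eq]
  constructor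
  · rintro ⟨j, ⟨hj0, hjR⟩, hget⟩
    have hlt : j.toNat < row.length := by
      by_contra hge
      rw [PySem.List.pyGetD_of_nonneg row 0 hj0, List.getD_eq_default _ _ (by omega)] at hget
      exact absurd hget (by decide)
    refine ⟨j.toNat, by omega, ?_⟩
    rw [PySem.List.pyGetD_eq_getElem row 0 hj0 (by omega)] at hget
    exact hget
  · rintro ⟨k, hk, hget⟩
    have hkr : k < row.length := by omega
    refine ⟨(k : Int), ⟨by omega, by omega⟩, ?_⟩
    rw [PySem.List.pyGetD_eq_getElem row 0 (by omega) (by exact_mod_cast hkr)]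
    simpa using hget

-- membership in the comprehension {p.1 for p in enumerate(xs) if q(p.2)}
theorem mem_goodIdx (xs : List (List Int)) (q : List Int → Bool) (i : Int) :
    (i ∈ (((PySem.List.enumerate xs).filter (fun p => q p.2)).map (fun p => p.1))) ↔
      ∃ (k : Nat) (_ : k < xs.length), i = (k : Int) ∧ q xs[k] := by
  simp only [List.mem_map, List.mem_filter, PySem.List.mem_enumerate_iff]
  constructor
  · rintro ⟨p, ⟨⟨k, hk, rfl⟩, hq⟩, rfl⟩
    exact ⟨k, hk, by simp, by simpa using hq⟩
  · rintro ⟨k, hk, rfl, hq⟩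
    exact ⟨((0 : Int) + (k : Int), xs[k]), ⟨⟨k, hk, rfl⟩, hq⟩, by simp⟩

-- for 0 ≤ i < R, A's per-matrix flag equals membership of i in B's per-matrix set
theorem aRow_eq_altRowSet (m : List (List Int)) (R i : Int) (hi0 : 0 ≤ i) (hiR : i < R) :
    aRowLoop (PySem.List.pyGetD m i []) (PySem.List.pyRange 0 R 1) =
      (altRowSet R m).contains i := by
  have hR0 : (0 : Int) ≤ R := le_trans hi0 (le_of_lt hiR)
  rw [aRowLoop_range_eq, Bool.eq_iff_iff]
  unfold altRowSet PySem.Set.contains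
  rw [List.contains_iff_mem, List.contains_iff_mem, PySem.Set.mem_ofList,
    PySem.List.slice_to m hR0,
    mem_goodIdx (List.take R.toNat m) (fun r => (PySem.List.slice r none (some R)).contains 1) i]
  constructor
  · intro h1
    have hrow : i.toNat < m.length := by
      by_contra hge
      have hnil : PySem.List.pyGetD m i ([] : List Int) = [] := by
        rw [PySem.List.pyGetD_of_nonneg m [] hi0, List.getD_eq_default _ _ (by omega)]
      rw [hnil] at h1; simp at h1
    have hval : PySem.List.pyGetD m i ([] : List Int) = m[i.toNat] :=
      PySem.List.pyGetD_eq_getElem m [] hi0 (by omega)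
    refine ⟨i.toNat, by simp; omega, by omega, ?_⟩
    rw [List.getElem_take, PySem.List.slice_to _ hR0, List.contains_iff_mem]
    rw [hval] at h1; exact h1
  · rintro ⟨k, hk, hik, hq⟩
    have hk' : k < m.length := by simp at hk; omega
    have hval : PySem.List.pyGetD m i ([] : List Int) = m[i.toNat] :=
      PySem.List.pyGetD_eq_getElem m [] hi0 (by omega)
    rw [hval]
    rw [List.getElem_take, PySem.List.slice_to _ hR0, List.contains_iff_mem] at hq
    have hik' : i.toNat = k := by omega
    simpa [hik'] using hq

-- B's intersection fold is a filter of the accumulator by 'in every per-matrix set'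
theorem foldl_inter_eq_filter (R : Int) (ms : List (List (List Int))) (g : List Int) :
    ms.foldl (fun g m => PySem.Set.inter g (altRowSet R m)) g =
      g.filter (fun i => ms.all (fun m => (altRowSet R m).contains i)) := by
  induction ms generalizing g with
  | nil => simp
  | cons m ms ih =>
    rw [List.foldl_cons, ih]
    simp only [PySem.Set.inter, List.filter_filter]
    apply List.filter_congr
    intro x _
    rw [List.all_cons]
    exact Bool.and_comm _ _

-- A is the iterated range filtered by its per-position flag
theorem find_conserved_regions_eq_filter (matrices : List (List (List Int))) (seq_len window threshold : Int) :
    find_conserved_regions matrices seq_len window threshold =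
      (PySem.List.pyRange 0 (seq_len - window + 1) 1).filter
        (fun i => aMatLoop i (seq_len - window + 1) matrices) := by
  unfold find_conserved_regions
  simpa using PySem.List.foldl_append_if (fun i => aMatLoop i (seq_len - window + 1) matrices)
    id (PySem.List.pyRange 0 (seq_len - window + 1) 1) []

-- ===== VERDICT (by name: the statement is the Claim_ definition above) =====
theorem find_conserved_regions_spec : Claim_equal_find_conserved_regions := by
  intro matrices seq_len window threshold _ _
  unfold Spec_find_conserved_regions find_conserved_regions_alt
  simp only [find_conserved_regions_eq_filter, foldl_inter_eq_filter]
  rw [show PySem.Set.ofList (PySem.List.pyRange 0 (seq_len - window + 1) 1) =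
      PySem.List.pyRange 0 (seq_len - window + 1) 1 by
    exact PySem.Set.ofList_eq_self_of_nodup _ (PySem.List.nodup_pyRange_one 0 (seq_len - window + 1))]
  rw [show (PySem.List.pyRange 0 (seq_len - window + 1) 1).filter
        (fun i => matrices.all (fun m => (altRowSet (seq_len - window + 1) m).contains i)) =
      (PySem.List.pyRange 0 (seq_len - window + 1) 1).filter
        (fun i => aMatLoop i (seq_len - window + 1) matrices) by
    apply List.filter_congr
    intro i hi
    rw [PySem.List.mem_pyRange_one] at hi
    rw [aMatLoop_eq_all]
    congr 1
    funext m
    exact (aRow_eq_altRowSet m (seq_len - window + 1) i hi.1 hi.2).symm]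
  exact (PySem.List.sorted_eq_of_perm_of_pairwise_lt _ _ _ (List.Perm.refl _)
    ((PySem.List.pairwise_lt_pyRange_one 0 (seq_len - window + 1)).filter _)).symm
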